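-- pv_equiv track=rewrite | github.com/KurtiZoltan/CompSim2 | python/coefficients.py | kernelPoints
-- ===== SOURCE A (Python) =====
-- def kernelPoints(radius, dim):
--     '''
--     up to mirroring returns the independent points of the stencil
--     '''
--     if dim == 1:
--         return [[i] for i in range(radius + 1)]
--     else:
--         ret = []
--         ending = kernelPoints(radius, dim - 1)
--         for i in range(radius + 1):
--             for end in ending:
--                 if i <= end[0]:
--                     new = end.copy()
--                     new.insert(0, i)
--                     ret.append(new)
--     return ret
-- ===== SOURCE B (Python) =====
-- from itertools import combinations_with_replacement
--
-- def kernelPoints(radius, dim):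
--     '''
--     up to mirroring returns the independent points of the stencil
--     '''
--     return [list(c) for c in combinations_with_replacement(range(radius + 1), dim)]
-- ===== Notes on version B (the rewrite author's own statement) =====
-- stated objective: idiomatic
-- what changed: Replaces the per-dimension recursion that filters i <= end[0] over the full lower-dimension list with a single itertools.combinations_with_replacement call generating the non-decreasing tuples directly in the same lexicographic order.
import Mathlib
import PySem

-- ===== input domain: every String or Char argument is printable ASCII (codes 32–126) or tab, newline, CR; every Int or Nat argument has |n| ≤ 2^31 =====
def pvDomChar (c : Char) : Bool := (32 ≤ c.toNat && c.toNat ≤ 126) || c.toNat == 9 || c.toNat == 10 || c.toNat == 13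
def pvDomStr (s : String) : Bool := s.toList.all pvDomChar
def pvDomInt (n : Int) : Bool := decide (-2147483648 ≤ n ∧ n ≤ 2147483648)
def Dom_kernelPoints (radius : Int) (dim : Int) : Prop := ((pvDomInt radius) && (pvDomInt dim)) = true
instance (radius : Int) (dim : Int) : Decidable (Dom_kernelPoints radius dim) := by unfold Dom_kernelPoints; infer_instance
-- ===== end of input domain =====

-- B replaces A's dimension-recursion-with-filter by a direct combinations_with_replacement
-- enumeration (idiomatic, one library call); equivalence is proved for dim ≥ 1 (Pre_).

-- ===== PORT A =====
-- literal port of A; for dim ≤ 0 (and dim ≠ 1) Python recurses forever, which is outside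
-- Pre_; the port returns [] there only to be total (a totality guard, not an algorithm).
def kernelPoints (radius : Int) (dim : Int) : List (List Int) :=
  if dim = 1 then
    (PySem.List.pyRange 0 (radius + 1) 1).map (fun i => [i])
  else if dim ≤ 0 then []
  else
    let ending := kernelPoints radius (dim - 1)
    (PySem.List.pyRange 0 (radius + 1) 1).foldl (fun ret i =>
      ending.foldl (fun r e =>
        -- end[0]: IndexError (never reached, ending's lists are nonempty) maps to 'skip'
        match PySem.List.pyGet? e 0 with
        | some h => if i ≤ h then r ++ [i :: e] else r
        | none => r) ret) []
termination_by dim.toNat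
decreasing_by omega

-- ===== PORT B =====
-- port of itertools.combinations_with_replacement(pool, n) for a list pool, in the
-- library's lexicographic emission order
def pvCWR : List Int → Nat → List (List Int)
  | _, 0 => [[]]
  | pool, n + 1 => pool.tails.flatMap (fun s =>
      match s with
      | [] => []
      | x :: rest => (pvCWR (x :: rest) n).map (fun t => x :: t))

def kernelPoints_alt (radius : Int) (dim : Int) : List (List Int) :=
  pvCWR (PySem.List.pyRange 0 (radius + 1) 1) dim.toNat

-- ===== PRECONDITION & SPEC =====
-- Pre_ excludes dim ≤ 0, where A never returns (infinite recursion / RecursionError).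
def Pre_kernelPoints (radius : Int) (dim : Int) : Prop := 1 ≤ dim
instance (radius : Int) (dim : Int) : Decidable (Pre_kernelPoints radius dim) := by
  unfold Pre_kernelPoints; infer_instance

def pvWitness_kernelPoints : Int × Int := (2, 2)

def Spec_kernelPoints (radius : Int) (dim : Int) (out : List (List Int)) : Prop := out = kernelPoints_alt radius dim
instance (radius : Int) (dim : Int) (out : List (List Int)) : Decidable (Spec_kernelPoints radius dim out) := by unfold Spec_kernelPoints; infer_instance

-- ===== CLAIM (what is proved, stated in full; the proofs are below) =====
def Claim_equal_kernelPoints : Prop := ∀ (radius : Int) (dim : Int), Dom_kernelPoints radius dim → Pre_kernelPoints radius dim → Spec_kernelPoints radius dim (kernelPoints radius dim)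
-- ===== LEMMAS AND PROOFS =====

-- head test 'i <= end[0]' as a Boolean predicate on a (nonempty) list
def pvHeadGE (i : Int) (l : List Int) : Bool :=
  match l with
  | h :: _ => decide (i ≤ h)
  | [] => false

theorem pvCWR_nil (n : Nat) : pvCWR [] (n + 1) = [] := by
  simp [pvCWR]

theorem pvCWR_cons (x : Int) (xs : List Int) (n : Nat) :
    pvCWR (x :: xs) (n + 1)
    = (pvCWR (x :: xs) n).map (fun t => x :: t) ++ pvCWR xs (n + 1) := by
  conv_lhs => rw [pvCWR]
  conv_rhs => rw [pvCWR]
  simp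

theorem pvCWR_one (pool : List Int) : pvCWR pool 1 = pool.map (fun x => [x]) := by
  induction pool with
  | nil => simp [pvCWR_nil]
  | cons x xs ih => rw [pvCWR_cons, ih]; simp [pvCWR]

theorem pvCWR_head {pool : List Int} {n : Nat} {l : List Int}
    (hl : l ∈ pvCWR pool (n + 1)) : ∃ h t, l = h :: t ∧ h ∈ pool := by
  induction pool with
  | nil => rw [pvCWR_nil] at hl; simp at hl
  | cons x xs ih =>
    rw [pvCWR_cons] at hl
    simp only [List.mem_append, List.mem_map] at hl
    rcases hl with ⟨t, _, rfl⟩ | hl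
    · exact ⟨x, t, rfl, by simp⟩
    · obtain ⟨h, t, rfl, hmem⟩ := ih hl
      exact ⟨h, t, rfl, by simp [hmem]⟩

theorem pvGet0_nil : PySem.List.pyGet? ([] : List Int) 0 = none := by decide

theorem pvInner (i : Int) (ending : List (List Int)) (ret : List (List Int)) :
    ending.foldl (fun r e =>
      match PySem.List.pyGet? e 0 with
      | some h => if i ≤ h then r ++ [i :: e] else r
      | none => r) ret
    = ret ++ (ending.filter (pvHeadGE i)).map (fun e => i :: e) := by
  induction ending generalizing ret with
  | nil => simp
  | cons e es ih =>
    cases e with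
    | nil => simp [pvGet0_nil, pvHeadGE, ih]
    | cons h t =>
      by_cases hih : i ≤ h
      · simp [pvHeadGE, hih, ih]
      · simp [pvHeadGE, hih, ih]

theorem pvStep (pool : List Int) (n : Nat) (hp : pool.Pairwise (· < ·)) :
    pool.flatMap (fun i => ((pvCWR pool (n + 1)).filter (pvHeadGE i)).map (fun e => i :: e))
    = pvCWR pool (n + 2) := by
  induction pool with
  | nil => simp [pvCWR_nil]
  | cons x xs ih =>
    rw [List.pairwise_cons] at hp
    obtain ⟨hx, hxs⟩ := hp
    rw [List.flatMap_cons]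
    have h1 : (pvCWR (x :: xs) (n + 1)).filter (pvHeadGE x) = pvCWR (x :: xs) (n + 1) := by
      apply List.filter_eq_self.2
      intro l hl
      obtain ⟨h, t, rfl, hmem⟩ := pvCWR_head hl
      simp only [pvHeadGE, decide_eq_true_eq]
      rcases List.mem_cons.1 hmem with rfl | hmem
      · exact le_refl h
      · exact le_of_lt (hx h hmem)
    have h2 : ∀ i ∈ xs,
        ((pvCWR (x :: xs) (n + 1)).filter (pvHeadGE i)).map (fun e => i :: e)
        = ((pvCWR xs (n + 1)).filter (pvHeadGE i)).map (fun e => i :: e) := by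
      intro i hi
      have hxi : ¬ i ≤ x := not_le.2 (hx i hi)
      congr 1
      rw [pvCWR_cons, List.filter_append, List.filter_map]
      have : (pvHeadGE i ∘ fun t => x :: t) = fun _ => false := by
        funext t; simp [pvHeadGE, Function.comp, hxi]
      rw [this]
      simp
    rw [h1, List.flatMap_congr h2, ih hxs]
    exact (pvCWR_cons x xs (n + 1)).symm

theorem pvMain (n : Nat) (radius : Int) :
    kernelPoints radius ((n : Int) + 1)
    = pvCWR (PySem.List.pyRange 0 (radius + 1) 1) (n + 1) := by
  induction n with
  | zero =>
    rw [kernelPoints]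
    norm_num [pvCWR_one]
  | succ m ih =>
    rw [kernelPoints]
    push_cast
    have h1 : ¬ ((m : Int) + 1 + 1 = 1) := by omega
    have h2 : ¬ ((m : Int) + 1 + 1 ≤ 0) := by omega
    rw [if_neg h1, if_neg h2]
    have harg : (m : Int) + 1 + 1 - 1 = (m : Int) + 1 := by ring
    rw [harg, ih]
    have hinner : ∀ (acc : List (List Int)) (i : Int),
        i ∈ PySem.List.pyRange 0 (radius + 1) 1 →
        (pvCWR (PySem.List.pyRange 0 (radius + 1) 1) (m + 1)).foldl (fun r e =>
          match PySem.List.pyGet? e 0 with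
          | some h => if i ≤ h then r ++ [i :: e] else r
          | none => r) acc
        = acc ++ ((pvCWR (PySem.List.pyRange 0 (radius + 1) 1) (m + 1)).filter
            (pvHeadGE i)).map (fun e => i :: e) := by
      intro acc i _
      exact pvInner i _ acc
    rw [PySem.List.foldl_congr_mem _ _
        (fun ret i => ret ++ ((pvCWR (PySem.List.pyRange 0 (radius + 1) 1) (m + 1)).filter
          (pvHeadGE i)).map (fun e => i :: e)) _ hinner,
      PySem.List.foldl_append_eq_flatMap]
    rw [pvStep _ m (PySem.List.pairwise_lt_pyRange_one 0 (radius + 1))]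
    rfl

-- ===== VERDICT (by name: the statement is the Claim_ definition above) =====
theorem kernelPoints_spec : Claim_equal_kernelPoints := by
  intro radius dim _ hpre
  unfold Spec_kernelPoints kernelPoints_alt Pre_kernelPoints at *
  obtain ⟨n, hn⟩ : ∃ n : Nat, dim = (n : Int) + 1 :=
    ⟨(dim - 1).toNat, by omega⟩
  subst hn
  have : ((n : Int) + 1).toNat = n + 1 := by omega
  rw [this]
  exact pvMain n radius
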